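-- pv_equiv track=rewrite | github.com/aronkeiser/advent-of-code | 2015/solution/solution_2015-05.py | check_crit1
-- ===== SOURCE A (Python) =====
-- from collections import Counter
--
-- def check_crit1(word):
--
--     # Generate all pairs form test word
--     pairs = [word[i:i+2] for i in range(len(word)-1)]
--     pairs_ct = Counter(pairs)
--
--     # Generate list of pairs that appear more than once
--     pairs_dup = {key: value for key, value in pairs_ct.items() if value > 1}
--
--     # Check if pairs are homogenous (contain 2 equal letters)
--     pairs_dup_hom = list()
--     for pair in pairs_dup.keys():
--
--         pair_dup_hom = [(True if char_first == char_second else False)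
--                         for char_first, char_second in [pair]]
--         pairs_dup_hom.extend(pair_dup_hom)
--
--     # If all duplicate pairs are homogenous, perform overlap check
--     if all(pairs_dup_hom):
--
--         pairs_dup_hom_ovl = list()
--         for pair in list(pairs_dup.keys()):
--
--             # Determine length of word after removeing substring
--             l = len(word.replace(pair, ''))
--             # If letters don't overlap,
--             # len will be 12 after removing substring
--             if l > 12:
--                 pairs_dup_hom_ovl.append(True)
--             else:
--                 pairs_dup_hom_ovl.append(False)
--
--         if all(pairs_dup_hom_ovl): return False
--         else: return True
--     else: return True
-- ===== SOURCE B (Python) =====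
-- def check_crit1(word):
--     n = len(word)
--     counts = {}      # adjacent pair -> number of (possibly overlapping) occurrences
--     removable = {}   # char c -> number of chars that replacing the doubled pair c+c removes
--     run_char, run_len = None, 0
--     for i in range(n):
--         ch = word[i]
--         if i + 1 < n:
--             p = word[i] + word[i + 1]
--             counts[p] = counts.get(p, 0) + 1
--         if ch == run_char:
--             run_len += 1
--         else:
--             if run_len:
--                 removable[run_char] = removable.get(run_char, 0) + run_len // 2 * 2
--             run_char, run_len = ch, 1
--     if run_len:
--         removable[run_char] = removable.get(run_char, 0) + run_len // 2 * 2
--     return any(c > 1 and (p[0] != p[1] or n - removable[p[0]] <= 12)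
--                for p, c in counts.items())
-- ===== Notes on version B (the rewrite author's own statement) =====
-- stated objective: alternative
-- what changed: B replaces A's Counter/dict-comprehension plus per-duplicate-pair word.replace rescans by one pair-count dict and a single run-length pass that precomputes, per character, how many characters replacing its doubled pair would remove, then a single any() over the counted pairs.
import Mathlib
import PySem

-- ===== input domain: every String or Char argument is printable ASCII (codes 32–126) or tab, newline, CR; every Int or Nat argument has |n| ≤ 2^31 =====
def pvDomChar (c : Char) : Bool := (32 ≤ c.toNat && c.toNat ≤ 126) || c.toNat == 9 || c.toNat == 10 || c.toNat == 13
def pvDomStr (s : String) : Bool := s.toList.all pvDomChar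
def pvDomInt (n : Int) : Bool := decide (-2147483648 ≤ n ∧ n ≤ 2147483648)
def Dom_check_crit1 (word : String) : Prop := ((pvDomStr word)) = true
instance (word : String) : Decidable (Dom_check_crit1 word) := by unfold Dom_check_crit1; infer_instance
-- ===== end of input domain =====

-- B: same AoC day-5 pair criterion, but computed with one pair-count dict and a single
-- run-length pass replacing A's Counter + per-duplicate-pair word.replace scans
-- (objective: alternative decomposition; no measured speed difference).


-- ===== PORT A =====
def check_crit1 (word : String) : Bool :=
  let w := word.toList
  -- pairs = [word[i:i+2] for i in range(len(word)-1)]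
  let pairs : List (List Char) :=
    (PySem.List.pyRange 0 ((w.length : Int) - 1) 1).map
      (fun i => PySem.List.slice w (some i) (some (i + 2)))
  -- pairs_ct = Counter(pairs)
  let pairs_ct : PySem.Dict (List Char) Int := PySem.Dict.counter pairs
  -- pairs_dup = {key: value for key, value in pairs_ct.items() if value > 1}
  let pairs_dup : PySem.Dict (List Char) Int :=
    (pairs_ct.items.filter (fun kv => decide (1 < kv.2))).foldl
      (fun d kv => d.insert kv.1 kv.2) PySem.Dict.empty
  -- homogeneity list; 'for char_first, char_second in [pair]' unpacks the 2-char pair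
  -- (every key of pairs_dup has length 2, so the '_' branch is unreachable)
  let pairs_dup_hom : List Bool :=
    pairs_dup.keys.foldl
      (fun acc pair =>
        acc ++ (match pair with
                | [char_first, char_second] => [char_first == char_second]
                | _ => []))
      []
  if pairs_dup_hom.all id then
    let pairs_dup_hom_ovl : List Bool :=
      pairs_dup.keys.foldl
        (fun acc pair =>
          let l : Int := ((PySem.Chars.replace w pair []).length : Int)
          if 12 < l then acc ++ [true] else acc ++ [false])
        []
    if pairs_dup_hom_ovl.all id then false else true
  else true

-- ===== PORT B =====
-- 'if run_len: removable[run_char] = removable.get(run_char, 0) + run_len // 2 * 2'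
-- (run_char is None only while run_len == 0, so the 'none' branch is unreachable)
def pvFlush (d : PySem.Dict Char Int) (rc : Option Char) (k : Int) : PySem.Dict Char Int :=
  if k ≠ 0 then
    match rc with
    | some c => d.insert c (d.getD c 0 + PySem.Int.floordiv k 2 * 2)
    | none => d
  else d

def pvStep (st : PySem.Dict Char Int × Option Char × Int) (ch : Char) :
    PySem.Dict Char Int × Option Char × Int :=
  if (some ch : Option Char) == st.2.1 then (st.1, st.2.1, st.2.2 + 1)
  else (pvFlush st.1 st.2.1 st.2.2, some ch, 1)

def check_crit1_alt (word : String) : Bool :=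
  let w := word.toList
  let n := w.length
  -- counts: for a, b in zip(word, word[1:]): counts[a+b] = counts.get(a+b, 0) + 1
  let counts : PySem.Dict (List Char) Int :=
    (w.zip (PySem.Chars.slice w (some 1) none)).foldl
      (fun d ab => d.insert [ab.1, ab.2] (d.getD [ab.1, ab.2] 0 + 1)) PySem.Dict.empty
  -- run-length pass + final flush
  let st := w.foldl pvStep (PySem.Dict.empty, none, 0)
  let removable := pvFlush st.1 st.2.1 st.2.2
  -- any(c > 1 and (p[0] != p[1] or n - removable[p[0]] <= 12) for p, c in counts.items())
  -- (keys are 2-char strings: p[0] is headI, p[1] is tail.headI; removable[p[0]] is only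
  --  reached for homogeneous keys, whose character always has an entry)
  counts.items.any (fun pc =>
    decide (1 < pc.2) &&
      ((pc.1.headI != pc.1.tail.headI) ||
        decide ((n : Int) - removable.getD pc.1.headI 0 ≤ 12)))


-- ===== PRECONDITION & SPEC =====
def Spec_check_crit1 (word : String) (out : Bool) : Prop := out = check_crit1_alt word
instance (word : String) (out : Bool) : Decidable (Spec_check_crit1 word out) := by unfold Spec_check_crit1; infer_instance

-- ===== CLAIM (what is proved, stated in full; the proofs are below) =====
def Claim_equal_check_crit1 : Prop := ∀ (word : String), Dom_check_crit1 word → Spec_check_crit1 word (check_crit1 word)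

-- ===== LEMMAS AND PROOFS =====

def pvGreedy (c : Char) : List Char → Nat
  | a :: b :: t => if a = c ∧ b = c then 1 + pvGreedy c t else pvGreedy c (b :: t)
  | _ => 0

lemma pvGreedy_le (c : Char) : ∀ l : List Char, 2 * pvGreedy c l ≤ l.length := by
  intro l
  induction l using pvGreedy.induct c with
  | case1 a b t hc ih => simp [pvGreedy, hc]; omega
  | case2 a b t hc ih => simp only [pvGreedy, if_neg hc, List.length_cons] at *; omega
  | case3 l h => cases l with
    | nil => simp [pvGreedy]
    | cons a t => cases t with
      | nil => simp [pvGreedy]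
      | cons b t' => exact absurd rfl (h a b t')

lemma pvGreedy_cons_ne (c a : Char) (h : a ≠ c) (s : List Char) :
    pvGreedy c (a :: s) = pvGreedy c s := by
  cases s with
  | nil => simp [pvGreedy]
  | cons b t => simp [pvGreedy]; intro ha; exact absurd ha h

lemma pvGreedy_replicate_ne (c rc : Char) (h : rc ≠ c) (k : Nat) (s : List Char) :
    pvGreedy c (List.replicate k rc ++ s) = pvGreedy c s := by
  induction k with
  | zero => simp
  | succ m ih => simpa [List.replicate_succ, pvGreedy_cons_ne c rc h] using ih

lemma pvGreedy_replicate_self_append (c x : Char) (h : x ≠ c) (k : Nat) (s : List Char) :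
    pvGreedy c (List.replicate k c ++ x :: s) = k / 2 + pvGreedy c (x :: s) := by
  induction k using Nat.twoStepInduction with
  | zero => simp
  | one => simp [List.replicate_succ, pvGreedy, h]
  | more m ih _ =>
      have h2 : List.replicate (m + 1 + 1) c ++ x :: s = c :: c :: (List.replicate m c ++ x :: s) := by
        simp [List.replicate_succ]
      rw [h2]
      simp only [pvGreedy]
      split
      · rw [ih]; omega
      · simp_all

lemma pvGreedy_replicate_self (c : Char) (k : Nat) :
    pvGreedy c (List.replicate k c) = k / 2 := by
  induction k using Nat.twoStepInduction with
  | zero => simp [pvGreedy]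
  | one => simp [pvGreedy]
  | more m ih _ =>
      have h2 : List.replicate (m + 1 + 1) c = c :: c :: List.replicate m c := by
        simp [List.replicate_succ]
      rw [h2]
      simp only [pvGreedy]
      split
      · rw [ih]; omega
      · simp_all

lemma pvReplaceGo_len (c : Char) :
    ∀ (fuel : Nat) (l acc : List Char), l.length ≤ fuel →
      (PySem.Chars.replace.go [c, c] [] fuel l acc).length =
        acc.length + (l.length - 2 * pvGreedy c l) := by
  intro fuel
  induction fuel with
  | zero =>
      intro l acc h
      have : l = [] := List.eq_nil_of_length_eq_zero (Nat.le_zero.mp h)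
      subst this
      simp [PySem.Chars.replace.go, pvGreedy]
  | succ m ih =>
      intro l acc h
      cases l with
      | nil => simp [PySem.Chars.replace.go, pvGreedy]
      | cons a t =>
          rw [PySem.Chars.replace.go]
          by_cases hp : List.isPrefixOf [c, c] (a :: t) = true
          · rw [if_pos hp]
            obtain ⟨t', ht⟩ : ∃ t', a :: t = c :: c :: t' := by
              cases t with
              | nil => simp [List.isPrefixOf] at hp
              | cons b t' =>
                  simp [List.isPrefixOf] at hp
                  exact ⟨t', by rw [← hp.1, ← hp.2]⟩
            rw [ht] at h ⊢
            simp only [List.length_cons] at h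
            have h' : t'.length ≤ m := by omega
            have hdrop : List.drop (List.length [c, c]) (c :: c :: t') = t' := by simp
            rw [hdrop]
            simp only [List.reverse_nil, List.nil_append]
            rw [ih t' acc h']
            have hg : pvGreedy c (c :: c :: t') = 1 + pvGreedy c t' := by
              simp [pvGreedy]
            rw [hg]
            have := pvGreedy_le c t'
            simp only [List.length_cons]
            omega
          · rw [if_neg hp]
            have ht : t.length ≤ m := by simp at h; omega
            rw [ih t (a :: acc) ht]
            have hg : pvGreedy c (a :: t) = pvGreedy c t := by
              cases t with
              | nil => simp [pvGreedy]
              | cons b t' =>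
                  simp [List.isPrefixOf] at hp
                  simp only [pvGreedy]
                  rw [if_neg]
                  intro hab
                  exact hp hab.1.symm hab.2.symm
            rw [hg]
            have := pvGreedy_le c t
            simp only [List.length_cons]
            omega

lemma pvReplace_len (c : Char) (w : List Char) :
    (PySem.Chars.replace w [c, c] []).length = w.length - 2 * pvGreedy c w := by
  rw [PySem.Chars.replace]
  simp only [List.isEmpty_cons]
  have := pvReplaceGo_len c w.length w [] (le_refl _)
  simpa using this

lemma pvFloordivNat (k : Nat) : PySem.Int.floordiv (k : Int) 2 * 2 = ((2 * (k / 2) : Nat) : Int) := by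
  rw [PySem.Int.floordiv_eq_ediv_of_pos (by norm_num)]
  omega

lemma pvRun_invariant (c : Char) :
    ∀ (rest : List Char) (d : PySem.Dict Char Int) (rc : Char) (k : Nat), 1 ≤ k →
      (let st := rest.foldl pvStep (d, some rc, (k : Int));
        (pvFlush st.1 st.2.1 st.2.2).getD c 0) =
      d.getD c 0 + 2 * (pvGreedy c (List.replicate k rc ++ rest) : Int) := by
  intro rest
  induction rest with
  | nil =>
      intro d rc k hk
      simp only [List.foldl_nil, pvFlush]
      rw [if_pos (by exact_mod_cast Nat.one_le_iff_ne_zero.mp hk)]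
      by_cases hc : c = rc
      · subst hc
        rw [PySem.Dict.getD_insert_self]
        rw [pvFloordivNat]
        simp [pvGreedy_replicate_self]
      · rw [PySem.Dict.getD_insert_of_ne _ _ _ hc]
        rw [pvGreedy_replicate_ne c rc (fun h => hc h.symm) k []]
        simp [pvGreedy]
  | cons ch rest ih =>
      intro d rc k hk
      simp only [List.foldl_cons]
      by_cases hch : ch = rc
      · subst hch
        have hstep : pvStep (d, some ch, (k : Int)) ch = (d, some ch, ((k+1 : Nat) : Int)) := by
          simp only [pvStep, BEq.rfl, if_pos]
          push_cast
          ring_nf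
        rw [hstep, ih d ch (k+1) (by omega)]
        rw [show List.replicate k ch ++ ch :: rest = List.replicate (k+1) ch ++ rest by
          simp [List.replicate_succ']
        ]
      · have hstep : pvStep (d, some rc, (k : Int)) ch =
            (pvFlush d (some rc) (k : Int), some ch, ((1 : Nat) : Int)) := by
          simp [pvStep, hch]
        rw [hstep, ih _ ch 1 (le_refl _)]
        simp only [List.replicate_one, List.singleton_append]
        rw [pvFlush, if_pos (by exact_mod_cast Nat.one_le_iff_ne_zero.mp hk)]
        by_cases hc : c = rc
        · subst hc
          rw [PySem.Dict.getD_insert_self, pvFloordivNat]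
          rw [pvGreedy_replicate_self_append c ch (fun h => hch h) k rest]
          push_cast
          ring
        · rw [PySem.Dict.getD_insert_of_ne _ _ _ hc]
          rw [pvGreedy_replicate_ne c rc (fun h => hc h.symm) k (ch :: rest)]

lemma pvRemovable_getD (c : Char) (w : List Char) :
    (let st := w.foldl pvStep (PySem.Dict.empty, none, 0);
      (pvFlush st.1 st.2.1 st.2.2).getD c 0) = 2 * (pvGreedy c w : Int) := by
  cases w with
  | nil => simp [pvFlush, pvGreedy, PySem.Dict.getD_empty]
  | cons ch rest =>
      simp only [List.foldl_cons]
      have hstep : pvStep (PySem.Dict.empty, none, 0) ch =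
          (PySem.Dict.empty, some ch, ((1 : Nat) : Int)) := by
        simp [pvStep, pvFlush]
      rw [hstep]
      have := pvRun_invariant c rest PySem.Dict.empty ch 1 (le_refl _)
      simp only [List.replicate_one, List.singleton_append] at this
      rw [this, PySem.Dict.getD_empty]
      ring

lemma pvTake_two (w : List Char) (k : Nat) (h : k + 1 < w.length) :
    List.take 2 (List.drop k w) = [w[k], w[k+1]] := by
  have h1 : List.drop k w = w[k] :: List.drop (k+1) w := (List.getElem_cons_drop (by omega)).symm
  have h2 : List.drop (k+1) w = w[k+1] :: List.drop (k+2) w := (List.getElem_cons_drop (by omega)).symm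
  rw [h1, h2]
  rfl

lemma pvPairs_eq (w : List Char) :
    (PySem.List.pyRange 0 ((w.length : Int) - 1) 1).map
        (fun i => PySem.List.slice w (some i) (some (i + 2))) =
      (w.zip (PySem.Chars.slice w (some 1) none)).map (fun ab => [ab.1, ab.2]) := by
  have htail : PySem.Chars.slice w (some 1) none = w.tail := by
    simp [PySem.Chars.slice_eq_listSlice, PySem.List.slice_from_one]
  rw [htail]
  apply List.ext_getElem
  · simp [PySem.List.length_pyRange_one, List.length_tail]
  · intro k h1 h2
    simp only [List.getElem_map]
    have hlen : (PySem.List.pyRange 0 ((w.length : Int) - 1) 1).length = w.length - 1 := by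
      simp [PySem.List.length_pyRange_one]
    have hk : k + 1 < w.length := by
      simp only [List.length_map] at h1
      rw [hlen] at h1
      omega
    have hidx : (PySem.List.pyRange 0 ((w.length : Int) - 1) 1)[k] = (k : Int) := by
      rw [PySem.List.getElem_pyRange_one]; ring
    rw [hidx]
    have hsl : PySem.List.slice w (some (k : Int)) (some ((k : Int) + 2)) =
        List.take 2 (List.drop k w) := by
      have := PySem.List.slice_natCast_add w k 2
      simpa using this
    rw [hsl, pvTake_two w k hk]
    rw [List.getElem_zip]
    simp [List.getElem_tail]

def pvP (w : List Char) : List (List Char) := (w.zip w.tail).map (fun ab => [ab.1, ab.2])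

def pvDK (w : List Char) : List (List Char) :=
  (PySem.Set.ofList (pvP w)).filter (fun k => decide ((1:Int) < (List.count k (pvP w) : Int)))

def pvHom (p : List Char) : Bool :=
  (match p with | [cf, cs] => [cf == cs] | _ => []).all id

def pvOvl (w : List Char) (p : List Char) : Bool :=
  decide ((12:Int) < ((PySem.Chars.replace w p []).length : Int))

def pvBody (w : List Char) (p : List Char) : Bool :=
  (p.headI != p.tail.headI) ||
    decide ((w.length : Int) - 2 * (pvGreedy p.headI w : Int) ≤ 12)

lemma pvRemovable_getD' (c : Char) (w : List Char) :
    (pvFlush (w.foldl pvStep (PySem.Dict.empty, none, 0)).1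
             (w.foldl pvStep (PySem.Dict.empty, none, 0)).2.1
             (w.foldl pvStep (PySem.Dict.empty, none, 0)).2.2).getD c 0
      = 2 * (pvGreedy c w : Int) := by
  have := pvRemovable_getD c w
  simpa using this

lemma pvTail (w : List Char) : PySem.Chars.slice w (some 1) none = w.tail := by
  simp [PySem.Chars.slice_eq_listSlice, PySem.List.slice_from_one]

lemma pvB_eq (word : String) :
    check_crit1_alt word = (pvDK word.toList).any (pvBody word.toList) := by
  simp only [check_crit1_alt, pvTail]
  rw [← List.foldl_map (f := fun ab : Char × Char => [ab.1, ab.2])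
        (g := fun (d : PySem.Dict (List Char) Int) x => d.insert x (d.getD x 0 + 1))]
  rw [PySem.Dict.foldl_insert_getD_add_one_eq_counter, PySem.Dict.items_counter]
  rw [List.any_map]
  simp only [Function.comp_def, pvRemovable_getD']
  rw [pvDK, List.any_filter]
  simp only [pvP]
  apply PySem.List.any_congr_mem
  intro x _
  rfl

lemma pvIfIf (a b : Bool) :
    (if a = true then (if b = true then false else true) else true) = !(a && b) := by
  cases a <;> cases b <;> simp

lemma pvA_eq (word : String) :
    check_crit1 word =
      !((pvDK word.toList).all pvHom && (pvDK word.toList).all (pvOvl word.toList)) := by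
  simp only [check_crit1]
  rw [pvIfIf]
  rw [pvPairs_eq, pvTail]
  rw [PySem.Dict.items_counter, List.filter_map]
  rw [PySem.Dict.keys_foldl_insert_key _ Prod.fst (fun _ kv => kv.2) PySem.Dict.empty]
  rw [PySem.Dict.keys_empty, PySem.Set.update_nil_left]
  simp only [List.map_map, Function.comp_def, List.map_id']
  rw [PySem.Set.ofList_eq_self_of_nodup _ (List.Nodup.filter _ (PySem.Set.nodup_ofList _))]
  rw [PySem.List.foldl_append_eq_flatMap]
  simp only [List.nil_append, List.all_flatMap]
  rw [PySem.List.foldl_congr_mem _ _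
        (fun acc pair => acc ++ [decide ((12:Int) < ((PySem.Chars.replace word.toList pair []).length : Int))]) _
        (by
          intro acc x _
          by_cases h : (12:Int) < ((PySem.Chars.replace word.toList x []).length : Int) <;> simp [h])]
  rw [PySem.List.foldl_append_singleton_eq_map]
  simp only [List.nil_append, List.all_map]
  rfl

lemma pvShape (w : List Char) : ∀ p ∈ pvDK w, ∃ a b : Char, p = [a, b] := by
  intro p hp
  have hp' : p ∈ PySem.Set.ofList (pvP w) := List.mem_of_mem_filter hp
  rw [PySem.Set.mem_ofList] at hp'
  simp only [pvP, List.mem_map] at hp'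
  obtain ⟨ab, _, rfl⟩ := hp'
  exact ⟨ab.1, ab.2, rfl⟩

lemma pvPointwise (w : List Char) (p : List Char) (hp : p ∈ pvDK w) :
    pvBody w p = (!pvHom p || !pvOvl w p) := by
  obtain ⟨a, b, rfl⟩ := pvShape w p hp
  by_cases hab : a = b
  · subst hab
    have hle := pvGreedy_le a w
    have hrep := pvReplace_len a w
    simp only [pvBody, pvHom, pvOvl, hrep]
    have hcast : ((w.length - 2 * pvGreedy a w : Nat) : Int) =
        (w.length : Int) - 2 * (pvGreedy a w : Int) := by
      push_cast [Nat.cast_sub hle]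
      ring
    rw [hcast]
    by_cases h12 : (w.length : Int) - 2 * (pvGreedy a w : Int) ≤ 12
    · have h' : ¬ ((12:Int) < (w.length : Int) - 2 * (pvGreedy a w : Int)) := by omega
      simp [h12, h']
    · have h' : (12:Int) < (w.length : Int) - 2 * (pvGreedy a w : Int) := by omega
      simp [h12, h']
  · have h1 : (a == b) = false := by simp [hab]
    have h2 : (a != b) = true := by simp [bne, hab]
    simp [pvBody, pvHom, h1, h2]

lemma pvMain (w : List Char) :
    (!((pvDK w).all pvHom && (pvDK w).all (pvOvl w))) = (pvDK w).any (pvBody w) := by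
  cases hB : (pvDK w).any (pvBody w) with
  | true =>
      obtain ⟨x, hx, hbx⟩ := List.any_eq_true.mp hB
      rw [pvPointwise w x hx] at hbx
      rcases (by simpa using hbx : pvHom x = false ∨ pvOvl w x = false) with h | h
      · have hfa : (pvDK w).all pvHom = false :=
          List.all_eq_false.mpr ⟨x, hx, by simp [h]⟩
        simp [hfa]
      · have hfa : (pvDK w).all (pvOvl w) = false :=
          List.all_eq_false.mpr ⟨x, hx, by simp [h]⟩
        simp [hfa]
  | false =>
      have hall : ∀ x ∈ pvDK w, pvBody w x = false := by
        intro x hx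
        cases hv : pvBody w x with
        | false => rfl
        | true => exact absurd (List.any_eq_true.mpr ⟨x, hx, hv⟩) (by simp [hB])
      have h1 : (pvDK w).all pvHom = true := by
        rw [List.all_eq_true]
        intro x hx
        have hc := hall x hx
        rw [pvPointwise w x hx] at hc
        by_cases hh : pvHom x = true
        · simpa using hh
        · have hh' : pvHom x = false := by simpa using hh
          rw [hh'] at hc
          simp at hc
      have h2 : (pvDK w).all (pvOvl w) = true := by
        rw [List.all_eq_true]
        intro x hx
        have hc := hall x hx
        rw [pvPointwise w x hx] at hc
        by_cases hh : pvOvl w x = true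
        · simpa using hh
        · have hh' : pvOvl w x = false := by simpa using hh
          rw [hh'] at hc
          simp at hc
      simp [h1, h2]

-- ===== VERDICT (by name: the statement is the Claim_ definition above) =====
theorem check_crit1_spec : Claim_equal_check_crit1 := by
  intro word _
  unfold Spec_check_crit1
  rw [pvA_eq, pvB_eq, pvMain]
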